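-- pv_equiv track=rewrite | github.com/carolsmargiassimkt-cell/sdr-vps | process_spreadsheet_pipeline2.py | choose_best_phone
-- ===== SOURCE A (Python) =====
-- from collections import Counter, defaultdict
-- from typing import Any, Dict, List
--
-- def phone_is_valid(value: str) -> bool:
--     return 10 <= len(value) <= 11 and len(set(value)) > 1
--
-- def phone_is_mobile(value: str) -> bool:
--     return len(value) == 11 and value[2] == "9"
--
-- def choose_best_phone(phones: List[str], repeated_phones: Counter) -> str:
--     candidates = [phone for phone in phones if phone_is_valid(phone)]
--     candidates = [phone for phone in candidates if repeated_phones.get(phone, 0) <= 3]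
--     if not candidates:
--         return ""
--     mobile = [phone for phone in candidates if phone_is_mobile(phone)]
--     if mobile:
--         mobile.sort(key=lambda phone: (int(repeated_phones.get(phone, 0)), phone))
--         return mobile[0]
--     candidates.sort(key=lambda phone: (int(repeated_phones.get(phone, 0)), -len(phone), phone))
--     return candidates[0]
-- ===== SOURCE B (Python) =====
-- def choose_best_phone(phones, repeated_phones):
--     # One pass over the input: keep the running best candidate under a single
--     # combined key (mobile-first, fewest repeats, longest, lexicographic).
--     best = None
--     best_key = None
--     for phone in phones:
--         n = len(phone)
--         if not (10 <= n <= 11 and len(set(phone)) > 1):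
--             continue
--         count = int(repeated_phones.get(phone, 0))
--         if count > 3:
--             continue
--         key = (0 if n == 11 and phone[2] == "9" else 1, count, -n, phone)
--         if best is None or key < best_key:
--             best, best_key = phone, key
--     return "" if best is None else best
-- ===== Notes on version B (the rewrite author's own statement) =====
-- stated objective: alternative
-- what changed: A builds filtered candidate lists, splits off a mobile sublist and sorts one of two lists to take its head; B makes a single pass over the input keeping the running best candidate under one combined lexicographic key (mobile-flag, repeat-count, -length, phone), with no intermediate lists and no sort.
import Mathlib
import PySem

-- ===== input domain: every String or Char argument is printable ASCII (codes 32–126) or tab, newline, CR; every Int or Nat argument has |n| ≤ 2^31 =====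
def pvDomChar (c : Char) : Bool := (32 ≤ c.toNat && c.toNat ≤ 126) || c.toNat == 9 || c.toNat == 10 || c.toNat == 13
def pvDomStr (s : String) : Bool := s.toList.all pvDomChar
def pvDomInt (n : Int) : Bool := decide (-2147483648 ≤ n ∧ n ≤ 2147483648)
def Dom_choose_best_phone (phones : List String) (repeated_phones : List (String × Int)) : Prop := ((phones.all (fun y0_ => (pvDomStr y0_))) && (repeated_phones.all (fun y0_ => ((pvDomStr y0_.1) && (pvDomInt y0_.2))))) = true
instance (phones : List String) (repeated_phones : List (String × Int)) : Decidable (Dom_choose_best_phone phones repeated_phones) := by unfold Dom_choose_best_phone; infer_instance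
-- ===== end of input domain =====

-- B replaces A's filtered lists / mobile branch / two sorts by a single pass keeping the running
-- best candidate under one combined lexicographic key (no intermediate lists, no sort).
-- Python string comparison inside sort keys is represented on `.toList` (code-point lexicographic).

-- ===== PORT A =====
def phone_is_valid (value : String) : Bool :=
  decide (10 ≤ PySem.Str.len value) && decide (PySem.Str.len value ≤ 11) &&
    decide (1 < (PySem.Set.ofList value.toList).length)

def phone_is_mobile (value : String) : Bool :=
  (PySem.Str.len value == 11) && (PySem.Str.pyGet? value 2 == some '9')

def choose_best_phone (phones : List String) (repeated_phones : List (String × Int)) : String :=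
  let repeated : PySem.Dict String Int := PySem.Dict.ofList repeated_phones
  let candidates := phones.filter (fun phone => phone_is_valid phone)
  let candidates := candidates.filter (fun phone => decide (repeated.getD phone 0 ≤ 3))
  if candidates.isEmpty then ""
  else
    let mobile := candidates.filter (fun phone => phone_is_mobile phone)
    if !mobile.isEmpty then
      (PySem.List.sorted mobile (fun phone => toLex (repeated.getD phone 0, phone.toList))).headD ""
    else
      (PySem.List.sorted candidates
        (fun phone => toLex (repeated.getD phone 0, toLex (-(PySem.Str.len phone), phone.toList)))).headD ""

-- ===== PORT B =====
-- the loop body of Source B's single pass (the running best is `(phone, its key)`; `none` = best is None)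
def pvAltStep (repeated : PySem.Dict String Int)
    (best : Option (String × (Int ×ₗ Int ×ₗ Int ×ₗ List Char))) (phone : String) :
    Option (String × (Int ×ₗ Int ×ₗ Int ×ₗ List Char)) :=
  let n := PySem.Str.len phone
  if !(decide (10 ≤ n) && decide (n ≤ 11) && decide (1 < (PySem.Set.ofList phone.toList).length)) then
    best
  else
    let count := repeated.getD phone 0
    if decide (3 < count) then best
    else
      let key := toLex ((if (n == 11) && (PySem.Str.pyGet? phone 2 == some '9') then (0 : Int) else 1),
        toLex (count, toLex (-n, phone.toList)))
      match best with
      | none => some (phone, key)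
      | some (_, bk) => if key < bk then some (phone, key) else best

def choose_best_phone_alt (phones : List String) (repeated_phones : List (String × Int)) : String :=
  let repeated : PySem.Dict String Int := PySem.Dict.ofList repeated_phones
  match phones.foldl (pvAltStep repeated) none with
  | none => ""
  | some (p, _) => p

-- ===== PRECONDITION & SPEC =====
def Spec_choose_best_phone (phones : List String) (repeated_phones : List (String × Int)) (out : String) : Prop := out = choose_best_phone_alt phones repeated_phones
instance (phones : List String) (repeated_phones : List (String × Int)) (out : String) : Decidable (Spec_choose_best_phone phones repeated_phones out) := by unfold Spec_choose_best_phone; infer_instance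

-- ===== CLAIM (what is proved, stated in full; the proofs are below) =====
def Claim_equal_choose_best_phone : Prop := ∀ (phones : List String) (repeated_phones : List (String × Int)), Dom_choose_best_phone phones repeated_phones → Spec_choose_best_phone phones repeated_phones (choose_best_phone phones repeated_phones)

-- ===== LEMMAS AND PROOFS =====

-- the combined key of Source B, as a function of the phone
def pvKey (d : PySem.Dict String Int) (p : String) : Int ×ₗ Int ×ₗ Int ×ₗ List Char :=
  toLex ((if phone_is_mobile p then (0 : Int) else 1),
    toLex (d.getD p 0, toLex (-(PySem.Str.len p), p.toList)))

-- the running-min step, restricted to candidates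
def pvStep (d : PySem.Dict String Int)
    (best : Option (String × (Int ×ₗ Int ×ₗ Int ×ₗ List Char))) (phone : String) :
    Option (String × (Int ×ₗ Int ×ₗ Int ×ₗ List Char)) :=
  match best with
  | none => some (phone, pvKey d phone)
  | some (_, bk) => if pvKey d phone < bk then some (phone, pvKey d phone) else best

lemma pvAltStep_eq (d : PySem.Dict String Int) (best) (phone : String) :
    pvAltStep d best phone =
      if phone_is_valid phone && decide (d.getD phone 0 ≤ 3) then pvStep d best phone else best := by
  by_cases hv : (decide (10 ≤ PySem.Str.len phone) && decide (PySem.Str.len phone ≤ 11) &&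
      decide (1 < (PySem.Set.ofList phone.toList).length)) = true
  · obtain ⟨⟨h1, h2⟩, h3⟩ :
        (10 ≤ phone.length ∧ phone.length ≤ 11) ∧ 1 < (PySem.Set.ofList phone.toList).length := by
      simpa using hv
    by_cases hc : (3 : Int) < d.getD phone 0
    · simp [pvAltStep, phone_is_valid, hc, not_le.mpr hc, h1, h2, h3]
    · simp [pvAltStep, pvStep, pvKey, phone_is_valid, phone_is_mobile, not_lt.mp hc, h1, h2, h3]
  · have hx : (decide (10 ≤ PySem.Str.len phone) && decide (PySem.Str.len phone ≤ 11) &&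
        decide (1 < (PySem.Set.ofList phone.toList).length)) = false :=
      Bool.eq_false_iff.mpr hv
    simp only [pvAltStep, phone_is_valid, hx]
    simp

lemma pvStep_ne_none (d : PySem.Dict String Int) (acc) (x : String) : pvStep d acc x ≠ none := by
  unfold pvStep
  rcases acc with _ | ⟨q, bk⟩
  · simp
  · by_cases h : pvKey d x < bk <;> simp [h]

lemma pvFold_ne_none (d : PySem.Dict String Int) :
    ∀ (l : List String) (acc), (acc = none → l ≠ []) → l.foldl (pvStep d) acc ≠ none := by
  intro l
  induction l with
  | nil => intro acc h hn; exact (h hn) rfl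
  | cons x t ih =>
    intro acc _
    exact ih (pvStep d acc x) (fun h => absurd h (pvStep_ne_none d acc x))

lemma pvFold_spec (d : PySem.Dict String Int) :
    ∀ (l : List String) (acc : Option (String × (Int ×ₗ Int ×ₗ Int ×ₗ List Char))) (p : String) (k),
      (∀ q k', acc = some (q, k') → k' = pvKey d q) →
      l.foldl (pvStep d) acc = some (p, k) →
      k = pvKey d p ∧ (acc = some (p, k) ∨ p ∈ l) ∧ (∀ y ∈ l, k ≤ pvKey d y) ∧
        (∀ q k', acc = some (q, k') → k ≤ k') := by
  intro l
  induction l with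
  | nil =>
    intro acc p k hwf h
    simp only [List.foldl_nil] at h
    refine ⟨hwf p k h, Or.inl h, by simp, ?_⟩
    intro q k' hacc
    rw [h] at hacc
    cases hacc
    exact le_refl k
  | cons x t ih =>
    intro acc p k hwf h
    simp only [List.foldl_cons] at h
    -- facts about the stepped accumulator
    have hstep : ∃ q' k', pvStep d acc x = some (q', k') ∧ k' = pvKey d q' ∧
        k' ≤ pvKey d x ∧ (∀ q k0, acc = some (q, k0) → k' ≤ k0) ∧
        (q' = x ∨ pvStep d acc x = acc) := by
      rcases acc with _ | ⟨q0, bk⟩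
      · refine ⟨x, pvKey d x, rfl, rfl, le_refl _, ?_, Or.inl rfl⟩
        intro q k0 h0
        cases h0
      · have hbk : bk = pvKey d q0 := hwf q0 bk rfl
        by_cases hlt : pvKey d x < bk
        · refine ⟨x, pvKey d x, by simp [pvStep, hlt], rfl, le_refl _, ?_, Or.inl rfl⟩
          intro q k0 h0
          cases h0
          exact le_of_lt hlt
        · refine ⟨q0, bk, by simp [pvStep, hlt], hbk, not_lt.mp hlt, ?_,
            Or.inr (by simp [pvStep, hlt])⟩
          intro q k0 h0
          cases h0
          exact le_refl _
    obtain ⟨q', k', hacc', hk', hkx, hkold, hq'⟩ := hstep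
    rw [hacc'] at h
    obtain ⟨h1, h2, h3, h4⟩ := ih (some (q', k')) p k
      (by intro q k0 h0; cases h0; exact hk') h
    have hkk' : k ≤ k' := h4 q' k' rfl
    refine ⟨h1, ?_, ?_, ?_⟩
    · rcases h2 with h2 | h2
      · cases h2
        rcases hq' with rfl | heq
        · exact Or.inr (List.mem_cons_self)
        · rw [hacc'] at heq
          exact Or.inl heq.symm
      · exact Or.inr (List.mem_cons_of_mem _ h2)
    · intro y hy
      rcases List.mem_cons.mp hy with rfl | hy
      · exact le_trans hkk' hkx
      · exact h3 y hy
    · intro q k0 h0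
      exact le_trans hkk' (hkold q k0 h0)

lemma pvKey_inj (d : PySem.Dict String Int) {p q : String} (h : pvKey d p = pvKey d q) : p = q := by
  have := congrArg (fun k => (ofLex (ofLex (ofLex k).2).2).2) h
  simpa [pvKey, String.toList_inj] using this

lemma pvMobile_len {p : String} (h : phone_is_mobile p = true) : PySem.Str.len p = 11 := by
  unfold phone_is_mobile at h
  exact beq_iff_eq.mp (Bool.and_elim_left h)

lemma pvKey_le_of_mobile (d : PySem.Dict String Int) {p q : String}
    (hp : phone_is_mobile p = true) (hq : phone_is_mobile q = true)
    (h : (toLex (d.getD p 0, p.toList) : Int ×ₗ List Char) ≤ toLex (d.getD q 0, q.toList)) :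
    pvKey d p ≤ pvKey d q := by
  unfold pvKey
  rw [if_pos hp, if_pos hq, pvMobile_len hp, pvMobile_len hq]
  rcases Prod.Lex.le_iff.mp h with h | ⟨h1, h2⟩
  · exact Prod.Lex.le_iff.mpr (Or.inr ⟨rfl, Prod.Lex.le_iff.mpr (Or.inl (by simpa using h))⟩)
  · exact Prod.Lex.le_iff.mpr (Or.inr ⟨rfl, Prod.Lex.le_iff.mpr (Or.inr ⟨by simpa using h1,
      Prod.Lex.le_iff.mpr (Or.inr ⟨rfl, by simpa using h2⟩)⟩)⟩)

lemma pvKey_lt_of_mobile_not (d : PySem.Dict String Int) {p q : String}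
    (hp : phone_is_mobile p = true) (hq : phone_is_mobile q = false) :
    pvKey d p < pvKey d q := by
  unfold pvKey
  rw [if_pos hp, if_neg (by simp [hq])]
  exact Prod.Lex.lt_iff.mpr (Or.inl (by norm_num))

lemma pvKey_le_of_not_mobile (d : PySem.Dict String Int) {p q : String}
    (hp : phone_is_mobile p = false) (hq : phone_is_mobile q = false)
    (h : (toLex (d.getD p 0, toLex (-(PySem.Str.len p), p.toList)) : Int ×ₗ Int ×ₗ List Char) ≤
      toLex (d.getD q 0, toLex (-(PySem.Str.len q), q.toList))) :
    pvKey d p ≤ pvKey d q := by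
  unfold pvKey
  rw [if_neg (by simp [hp]), if_neg (by simp [hq])]
  rcases Prod.Lex.le_iff.mp h with h | ⟨h1, h2⟩
  · exact Prod.Lex.le_iff.mpr (Or.inr ⟨rfl, Prod.Lex.le_iff.mpr (Or.inl (by simpa using h))⟩)
  · exact Prod.Lex.le_iff.mpr (Or.inr ⟨rfl, Prod.Lex.le_iff.mpr (Or.inr ⟨by simpa using h1,
      by simpa using h2⟩)⟩)

-- ===== VERDICT (by name: the statement is the Claim_ definition above) =====
theorem choose_best_phone_spec : Claim_equal_choose_best_phone := by
  intro phones rp _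
  unfold Spec_choose_best_phone choose_best_phone choose_best_phone_alt
  dsimp only
  generalize PySem.Dict.ofList rp = d
  have hfold : phones.foldl (pvAltStep d) none =
      (phones.filter (fun p => phone_is_valid p && decide (d.getD p 0 ≤ 3))).foldl (pvStep d) none := by
    rw [← PySem.List.foldl_if_eq_foldl_filter
      (fun p => phone_is_valid p && decide (d.getD p 0 ≤ 3)) (pvStep d)]
    exact PySem.List.foldl_congr_mem _ _ _ _ (fun acc x _ => pvAltStep_eq d acc x)
  have hC : (phones.filter (fun p => phone_is_valid p)).filter
        (fun p => decide (d.getD p 0 ≤ 3)) =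
      phones.filter (fun p => phone_is_valid p && decide (d.getD p 0 ≤ 3)) := by
    rw [List.filter_filter]
    exact List.filter_congr (fun x _ => Bool.and_comm _ _)
  rw [hfold, hC]
  by_cases hnil : phones.filter (fun p => phone_is_valid p && decide (d.getD p 0 ≤ 3)) = []
  · rw [hnil]
    simp
  · rw [if_neg (by simp [hnil])]
    have hne := pvFold_ne_none d _ none (fun _ => hnil)
    obtain ⟨⟨pB, kB⟩, hB⟩ := Option.ne_none_iff_exists'.mp hne
    obtain ⟨hkB, hmemB, hminB, -⟩ := pvFold_spec d _ none pB kB (fun q k' h => by cases h) hB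
    have hmemB' : pB ∈ phones.filter (fun p => phone_is_valid p && decide (d.getD p 0 ≤ 3)) := by
      rcases hmemB with h | h
      · cases h
      · exact h
    rw [hB]
    by_cases hM : (phones.filter (fun p => phone_is_valid p && decide (d.getD p 0 ≤ 3))).filter
        (fun p => phone_is_mobile p) = []
    · rw [hM]
      simp only [List.isEmpty_nil, Bool.not_true, Bool.false_eq_true, if_false]
      have hmob : ∀ y ∈ phones.filter (fun p => phone_is_valid p && decide (d.getD p 0 ≤ 3)),
          phone_is_mobile y = false := by
        intro y hy
        have := List.filter_eq_nil_iff.mp hM y hy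
        simpa using this
      rcases hs : PySem.List.sorted
          (phones.filter (fun p => phone_is_valid p && decide (d.getD p 0 ≤ 3)))
          (fun phone => toLex (d.getD phone 0, toLex (-(PySem.Str.len phone), phone.toList)))
        with _ | ⟨m, t⟩
      · exact absurd ((PySem.List.sorted_eq_nil_iff _ _ _).mp hs) hnil
      · have hm : m ∈ phones.filter (fun p => phone_is_valid p && decide (d.getD p 0 ≤ 3)) := by
          have : m ∈ PySem.List.sorted
              (phones.filter (fun p => phone_is_valid p && decide (d.getD p 0 ≤ 3)))
              (fun phone => toLex (d.getD phone 0, toLex (-(PySem.Str.len phone), phone.toList))) := by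
            rw [hs]; exact List.mem_cons_self
          exact (PySem.List.sorted_perm _ _ _).mem_iff.mp this
        have hmin3 := PySem.List.key_head_sorted_le _ _ hs
        have hminA : ∀ y ∈ phones.filter (fun p => phone_is_valid p && decide (d.getD p 0 ≤ 3)),
            pvKey d m ≤ pvKey d y := fun y hy =>
          pvKey_le_of_not_mobile d (hmob m hm) (hmob y hy) (hmin3 y hy)
        simp only [List.headD_cons]
        refine pvKey_inj d (le_antisymm (hminA pB hmemB') ?_)
        rw [← hkB]
        exact hminB m hm
    · rw [if_pos (by rw [List.isEmpty_eq_false_iff.mpr hM]; rfl)]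
      rcases hs : PySem.List.sorted
          ((phones.filter (fun p => phone_is_valid p && decide (d.getD p 0 ≤ 3))).filter
            (fun p => phone_is_mobile p))
          (fun phone => toLex (d.getD phone 0, phone.toList))
        with _ | ⟨m, t⟩
      · exact absurd ((PySem.List.sorted_eq_nil_iff _ _ _).mp hs) hM
      · have hmM : m ∈ (phones.filter (fun p => phone_is_valid p && decide (d.getD p 0 ≤ 3))).filter
            (fun p => phone_is_mobile p) := by
          have : m ∈ PySem.List.sorted
              ((phones.filter (fun p => phone_is_valid p && decide (d.getD p 0 ≤ 3))).filter
                (fun p => phone_is_mobile p))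
              (fun phone => toLex (d.getD phone 0, phone.toList)) := by
            rw [hs]; exact List.mem_cons_self
          exact (PySem.List.sorted_perm _ _ _).mem_iff.mp this
        have hmC : m ∈ phones.filter (fun p => phone_is_valid p && decide (d.getD p 0 ≤ 3)) :=
          (List.mem_filter.mp hmM).1
        have hmmob : phone_is_mobile m = true := by simpa using (List.mem_filter.mp hmM).2
        have hmin2 := PySem.List.key_head_sorted_le _ _ hs
        have hminA : ∀ y ∈ phones.filter (fun p => phone_is_valid p && decide (d.getD p 0 ≤ 3)),
            pvKey d m ≤ pvKey d y := by
          intro y hy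
          by_cases hmy : phone_is_mobile y = true
          · exact pvKey_le_of_mobile d hmmob hmy
              (hmin2 y (List.mem_filter.mpr ⟨hy, by simpa using hmy⟩))
          · exact le_of_lt (pvKey_lt_of_mobile_not d hmmob (Bool.eq_false_iff.mpr hmy))
        simp only [List.headD_cons]
        refine pvKey_inj d (le_antisymm (hminA pB hmemB') ?_)
        rw [← hkB]
        exact hminB m hmC
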